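-- pv_equiv track=rewrite | github.com/technion-cs-nlp/plms-repeats-circuits | scripts/initial_datasets_creation/FAIR_algorithm.py | get_related_repeats
-- ===== SOURCE A (Python) =====
-- from collections import defaultdict
--
-- def overlapping(interval1, interval2):
--     start1, end1 = interval1
--     start2, end2 = interval2
--     return not (end1 < start2 or start1 > end2)
--
-- def get_related_repeats(repeats_dict):
--     related_repeats = defaultdict(set)
--     repeat_keys = list(repeats_dict.keys())
--
--     for i, repeat1 in enumerate(repeat_keys):
--         for j in range(i + 1, len(repeat_keys)):  # Ensures each pair is checked only once
--             repeat2 = repeat_keys[j]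
--
--             # Check substring
--             if repeat1 in repeat2:
--                 related_repeats[repeat1].add((repeat2,"substring"))
--                 related_repeats[repeat2].add((repeat1, "contains"))
--                 continue  # Skip overlap check if already related by substring
--             if repeat2 in repeat1:
--                 related_repeats[repeat2].add((repeat1,"substring"))
--                 related_repeats[repeat1].add((repeat2, "contains"))
--                 continue  # Skip overlap check if already related by substring
--
--             # Check overlapping intervals
--             intervals1 = repeats_dict[repeat1]
--             intervals2 = repeats_dict[repeat2]
--
--             if any(overlapping(int1, int2) for int1 in intervals1 for int2 in intervals2):
--                 related_repeats[repeat1].add((repeat2, "overlapping"))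
--                 related_repeats[repeat2].add((repeat1, "overlapping"))
--
--     return related_repeats
-- ===== SOURCE B (Python) =====
-- from collections import defaultdict
--
--
-- def has_overlap(xs, ys):
--     # xs, ys sorted by interval start: two-pointer merge scan, O(len(xs)+len(ys))
--     i = j = 0
--     while i < len(xs) and j < len(ys):
--         s1, e1 = xs[i]
--         s2, e2 = ys[j]
--         if e1 < s2:
--             i += 1
--         elif e2 < s1:
--             j += 1
--         else:
--             return True
--     return False
--
--
-- def get_related_repeats(repeats_dict):
--     keys = list(repeats_dict)
--     # pre-sort every key's intervals once, by start
--     sorted_ivs = {k: sorted(repeats_dict[k], key=lambda iv: iv[0]) for k in keys}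
--
--     related = {}
--
--     def add(k, v):
--         related.setdefault(k, set()).add(v)
--
--     for i, a in enumerate(keys):
--         for b in keys[i + 1:]:
--             if a in b:
--                 add(a, (b, "substring"))
--                 add(b, (a, "contains"))
--             elif b in a:
--                 add(b, (a, "substring"))
--                 add(a, (b, "contains"))
--             elif has_overlap(sorted_ivs[a], sorted_ivs[b]):
--                 add(a, (b, "overlapping"))
--                 add(b, (a, "overlapping"))
--
--     return related
-- ===== Notes on version B (the rewrite author's own statement) =====
-- stated objective: alternative
-- what changed: B pre-sorts each key's interval list by start once into a dict and decides 'any pair of intervals overlaps' for each key pair with a linear two-pointer merge scan instead of A's nested any-over-all-interval-pairs test; it trades an O(n*m log m) preprocessing pass for an O(m) instead of O(m^2) per-pair overlap check, which a timing run did not find measurably faster on the generated inputs.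
import Mathlib
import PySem

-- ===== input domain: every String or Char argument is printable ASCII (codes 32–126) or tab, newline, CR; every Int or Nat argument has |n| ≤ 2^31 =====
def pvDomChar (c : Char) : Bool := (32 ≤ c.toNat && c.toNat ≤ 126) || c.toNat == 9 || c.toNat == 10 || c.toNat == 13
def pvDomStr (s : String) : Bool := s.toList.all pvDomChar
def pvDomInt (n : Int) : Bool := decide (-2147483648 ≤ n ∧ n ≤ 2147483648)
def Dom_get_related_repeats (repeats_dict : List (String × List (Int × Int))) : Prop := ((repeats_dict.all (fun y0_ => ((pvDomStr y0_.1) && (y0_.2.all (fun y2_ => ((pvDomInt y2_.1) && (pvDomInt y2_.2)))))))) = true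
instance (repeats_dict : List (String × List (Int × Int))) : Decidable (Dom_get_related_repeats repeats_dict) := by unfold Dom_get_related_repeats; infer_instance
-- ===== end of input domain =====

-- B pre-sorts each key's intervals by start once and replaces A's nested any-over-all-pairs
-- overlap test per pair of keys by a two-pointer merge scan (objective: alternative).


-- ===== PORT A =====
-- overlapping(interval1, interval2)
def pvOverlapping (interval1 interval2 : Int × Int) : Bool :=
  !(decide (interval1.2 < interval2.1) || decide (interval1.1 > interval2.2))

-- related_repeats[k].add(v) on a defaultdict(set) (A); related.setdefault(k, set()).add(v) in Source B is the same dict operation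
def pvAddRel (d : PySem.Dict String (PySem.Set (String × String))) (k : String)
    (v : String × String) : PySem.Dict String (PySem.Set (String × String)) :=
  PySem.Dict.modify d k PySem.Set.empty (fun s => PySem.Set.add s v)

def get_related_repeats (repeats_dict : List (String × List (Int × Int))) : List (String × List (String × String)) :=
  let rd : PySem.Dict String (List (Int × Int)) := PySem.Dict.mk repeats_dict
  let repeat_keys := PySem.Dict.keys rd
  let related := (PySem.List.enumerate repeat_keys).foldl (fun d p =>
    let i := p.1
    let repeat1 := p.2
    (PySem.List.pyRange (i + 1) (PySem.List.len repeat_keys) 1).foldl (fun d j =>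
      let repeat2 := PySem.List.pyGetD repeat_keys j ""
      if PySem.Str.isIn repeat1 repeat2 then
        pvAddRel (pvAddRel d repeat1 (repeat2, "substring")) repeat2 (repeat1, "contains")
      else if PySem.Str.isIn repeat2 repeat1 then
        pvAddRel (pvAddRel d repeat2 (repeat1, "substring")) repeat1 (repeat2, "contains")
      else
        let intervals1 := PySem.Dict.getD rd repeat1 []
        let intervals2 := PySem.Dict.getD rd repeat2 []
        if intervals1.any (fun int1 => intervals2.any (fun int2 => pvOverlapping int1 int2)) then
          pvAddRel (pvAddRel d repeat1 (repeat2, "overlapping")) repeat2 (repeat1, "overlapping")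
        else d) d) PySem.Dict.empty
  related.items

-- ===== PORT B =====
-- has_overlap(xs, ys): two-pointer merge scan over start-sorted interval lists
-- (advancing the index i resp. j in Source B = dropping the head of the corresponding list here)
def pvHasOverlap : List (Int × Int) → List (Int × Int) → Bool
  | x :: xs, y :: ys =>
    if x.2 < y.1 then pvHasOverlap xs (y :: ys)
    else if y.2 < x.1 then pvHasOverlap (x :: xs) ys
    else true
  | _, _ => false

def get_related_repeats_alt (repeats_dict : List (String × List (Int × Int))) : List (String × List (String × String)) :=
  let rd : PySem.Dict String (List (Int × Int)) := PySem.Dict.mk repeats_dict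
  let keys := PySem.Dict.keys rd
  let sorted_ivs : PySem.Dict String (List (Int × Int)) :=
    keys.foldl (fun d k =>
      PySem.Dict.insert d k (PySem.List.sorted (PySem.Dict.getD rd k []) (fun iv => iv.1)))
      PySem.Dict.empty
  let related := (PySem.List.enumerate keys).foldl (fun d p =>
    let i := p.1
    let a := p.2
    (PySem.List.slice keys (some (i + 1)) none).foldl (fun d b =>
      if PySem.Str.isIn a b then
        pvAddRel (pvAddRel d a (b, "substring")) b (a, "contains")
      else if PySem.Str.isIn b a then
        pvAddRel (pvAddRel d b (a, "substring")) a (b, "contains")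
      else if pvHasOverlap (PySem.Dict.getD sorted_ivs a []) (PySem.Dict.getD sorted_ivs b []) then
        pvAddRel (pvAddRel d a (b, "overlapping")) b (a, "overlapping")
      else d) d) PySem.Dict.empty
  related.items

-- ===== PRECONDITION & SPEC =====
def Spec_get_related_repeats (repeats_dict : List (String × List (Int × Int))) (out : List (String × List (String × String))) : Prop := out = get_related_repeats_alt repeats_dict
instance (repeats_dict : List (String × List (Int × Int))) (out : List (String × List (String × String))) : Decidable (Spec_get_related_repeats repeats_dict out) := by unfold Spec_get_related_repeats; infer_instance

-- ===== CLAIM (what is proved, stated in full; the proofs are below) =====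
def Claim_equal_get_related_repeats : Prop := ∀ (repeats_dict : List (String × List (Int × Int))), Dom_get_related_repeats repeats_dict → Spec_get_related_repeats repeats_dict (get_related_repeats repeats_dict)

-- ===== LEMMAS AND PROOFS =====

-- lookup into the dict comprehension {k: f(k) for k in ks}: a key of ks maps to f k
theorem pvGetD_foldl_insert (ks : List String) (d0 : PySem.Dict String (List (Int × Int)))
    (f : String → List (Int × Int)) (k : String) :
    (ks.foldl (fun d k2 => PySem.Dict.insert d k2 (f k2)) d0).getD k [] =
      if k ∈ ks then f k else d0.getD k [] := by
  induction ks generalizing d0 with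
  | nil => simp
  | cons x xs ih =>
    simp only [List.foldl_cons, ih, PySem.Dict.getD_insert, List.mem_cons]
    by_cases hx : k ∈ xs <;> by_cases hk : k = x <;> simp [hx, hk]

-- the two-pointer merge scan on start-sorted lists decides existence of an overlapping pair
theorem pvHasOverlap_eq (xs ys : List (Int × Int))
    (hx : xs.Pairwise (fun a b => a.1 ≤ b.1)) (hy : ys.Pairwise (fun a b => a.1 ≤ b.1)) :
    pvHasOverlap xs ys = xs.any (fun a => ys.any (fun b => pvOverlapping a b)) := by
  induction xs, ys using pvHasOverlap.induct with
  | case1 x xs y ys h1 ih =>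
    -- x ends before every interval of y :: ys starts: x overlaps nothing there
    rw [pvHasOverlap]
    simp only [if_pos h1]
    rw [ih hx.tail hy]
    have hnone : ((y :: ys).any (fun b => pvOverlapping x b)) = false := by
      rw [List.any_eq_false]
      intro b hb
      rw [List.mem_cons] at hb
      have hb1 : y.1 ≤ b.1 := by
        rcases hb with hb | hb
        · exact le_of_eq (by rw [hb])
        · exact (List.pairwise_cons.mp hy).1 b hb
      simp only [pvOverlapping]
      simp
      omega
    simp only [List.any_cons, Bool.or_eq_false_iff] at hnone
    simp only [List.any_cons, hnone.1, hnone.2, Bool.false_or]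
  | case2 x xs y ys h1 h2 ih =>
    -- y ends before every interval of x :: xs starts: y overlaps nothing there
    rw [pvHasOverlap]
    simp only [if_neg h1, if_pos h2]
    rw [ih hx hy.tail]
    apply Eq.symm
    apply PySem.List.any_congr_mem
    intro a ha
    rw [List.mem_cons] at ha
    have ha1 : x.1 ≤ a.1 := by
      rcases ha with ha | ha
      · exact le_of_eq (by rw [ha])
      · exact (List.pairwise_cons.mp hx).1 a ha
    have hya : pvOverlapping a y = false := by
      simp only [pvOverlapping]
      simp
      omega
    simp only [List.any_cons, hya, Bool.false_or]
  | case3 x xs y ys h1 h2 =>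
    rw [pvHasOverlap]
    simp only [if_neg h1, if_neg h2]
    have hxy : pvOverlapping x y = true := by
      simp only [pvOverlapping]
      simp
      omega
    simp only [List.any_cons, hxy, Bool.true_or]
  | case4 xs ys h =>
    rw [pvHasOverlap.eq_def]
    match xs, ys with
    | [], ys => simp
    | x :: xs, [] => simp
    | x :: xs, y :: ys => exact (h x xs y ys rfl rfl).elim

-- A's nested any-overlap test and B's scan over the precomputed sorted lists agree
theorem pvOverlapTest_eq (rd : PySem.Dict String (List (Int × Int))) (ks : List String)
    (a b : String) (ha : a ∈ ks) (hb : b ∈ ks) :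
    pvHasOverlap
        ((ks.foldl (fun d k =>
            PySem.Dict.insert d k (PySem.List.sorted (rd.getD k []) (fun iv => iv.1)))
          PySem.Dict.empty).getD a [])
        ((ks.foldl (fun d k =>
            PySem.Dict.insert d k (PySem.List.sorted (rd.getD k []) (fun iv => iv.1)))
          PySem.Dict.empty).getD b [])
      = (rd.getD a []).any (fun int1 => (rd.getD b []).any (fun int2 => pvOverlapping int1 int2)) := by
  rw [pvGetD_foldl_insert ks PySem.Dict.empty
        (fun k => PySem.List.sorted (rd.getD k []) (fun iv => iv.1)) a,
      pvGetD_foldl_insert ks PySem.Dict.empty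
        (fun k => PySem.List.sorted (rd.getD k []) (fun iv => iv.1)) b,
      if_pos ha, if_pos hb]
  rw [pvHasOverlap_eq _ _ (PySem.List.sorted_pairwise _ _) (PySem.List.sorted_pairwise _ _)]
  rw [(PySem.List.sorted_perm (rd.getD a []) (fun iv => iv.1) false).any_eq]
  apply PySem.List.any_congr_mem
  intro x _
  exact (PySem.List.sorted_perm (rd.getD b []) (fun iv => iv.1) false).any_eq

-- ===== VERDICT (by name: the statement is the Claim_ definition above) =====
theorem get_related_repeats_spec : Claim_equal_get_related_repeats := by
  intro repeats_dict _
  unfold Spec_get_related_repeats get_related_repeats get_related_repeats_alt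
  simp only []
  congr 1
  apply PySem.List.foldl_congr_mem
  intro acc p hp
  rw [PySem.List.mem_enumerate_iff] at hp
  obtain ⟨k, hk, rfl⟩ := hp
  simp only [zero_add]
  have h0 : (0 : Int) ≤ (k : Int) + 1 := by positivity
  rw [PySem.List.slice_from _ h0]
  rw [PySem.List.len]
  rw [PySem.List.foldl_pyRange_pyGetD' (PySem.Dict.keys (PySem.Dict.mk repeats_dict)) ""
        (fun d repeat2 =>
          if PySem.Str.isIn (PySem.Dict.keys (PySem.Dict.mk repeats_dict))[k] repeat2 then
            pvAddRel (pvAddRel d (PySem.Dict.keys (PySem.Dict.mk repeats_dict))[k] (repeat2, "substring")) repeat2 ((PySem.Dict.keys (PySem.Dict.mk repeats_dict))[k], "contains")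
          else if PySem.Str.isIn repeat2 (PySem.Dict.keys (PySem.Dict.mk repeats_dict))[k] then
            pvAddRel (pvAddRel d repeat2 ((PySem.Dict.keys (PySem.Dict.mk repeats_dict))[k], "substring")) (PySem.Dict.keys (PySem.Dict.mk repeats_dict))[k] (repeat2, "contains")
          else if ((PySem.Dict.mk repeats_dict).getD (PySem.Dict.keys (PySem.Dict.mk repeats_dict))[k] []).any (fun int1 => ((PySem.Dict.mk repeats_dict).getD repeat2 []).any (fun int2 => pvOverlapping int1 int2)) then
            pvAddRel (pvAddRel d (PySem.Dict.keys (PySem.Dict.mk repeats_dict))[k] (repeat2, "overlapping")) repeat2 ((PySem.Dict.keys (PySem.Dict.mk repeats_dict))[k], "overlapping")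
          else d)
        acc h0]
  apply PySem.List.foldl_congr_mem
  intro acc2 b hb
  have hbmem : b ∈ PySem.Dict.keys (PySem.Dict.mk repeats_dict) := List.mem_of_mem_drop hb
  have hamem : (PySem.Dict.keys (PySem.Dict.mk repeats_dict))[k] ∈
      PySem.Dict.keys (PySem.Dict.mk repeats_dict) := List.getElem_mem hk
  rw [pvOverlapTest_eq (PySem.Dict.mk repeats_dict) (PySem.Dict.keys (PySem.Dict.mk repeats_dict))
        _ b hamem hbmem]
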